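-- pv_equiv track=rewrite | github.com/savula15/Playground | practice/compression.py | compression2
-- ===== SOURCE A (Python) =====
-- def compression2(astring):
--     ''' Store the position of the character.
--
--     Uses String operations which is efficient. It means less function calls
--     '''
--     if len(astring) < 1:
--         return
--
--     i = 0
--     prev = ''
--     result = ''
--
--     while i < len(astring):
--         if astring[i] != prev:
--             result += astring[i]+str(i)
--             prev = astring[i]
--
--         i += 1
--
--     return result
-- ===== SOURCE B (Python) =====
-- def compression2(astring):
--     if len(astring) < 1:
--         return
--     parts = []
--     i = 0
--     n = len(astring)
--     while i < n:
--         j = i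
--         while j < n and astring[j] == astring[i]:
--             j += 1
--         parts.append(astring[i] + str(i))
--         i = j
--     return "".join(parts)
-- ===== Notes on version B (the rewrite author's own statement) =====
-- stated objective: faster
-- what changed: B walks maximal runs of equal characters (an inner scan finds each run's end) and appends each run head with its cumulative start index to a list joined once at the end, instead of A's char-by-char pass comparing against a prev sentinel and growing the result by repeated string concatenation.
import Mathlib
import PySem

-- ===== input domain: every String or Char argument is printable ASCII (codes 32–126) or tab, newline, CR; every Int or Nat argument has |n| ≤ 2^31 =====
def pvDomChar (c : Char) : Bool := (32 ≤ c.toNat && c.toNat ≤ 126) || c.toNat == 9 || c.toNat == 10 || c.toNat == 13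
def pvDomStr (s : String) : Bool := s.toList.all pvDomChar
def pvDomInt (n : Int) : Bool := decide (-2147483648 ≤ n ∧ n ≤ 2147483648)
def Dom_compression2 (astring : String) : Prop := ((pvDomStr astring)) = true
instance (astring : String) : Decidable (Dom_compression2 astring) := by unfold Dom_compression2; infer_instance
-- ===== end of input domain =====

-- ===== PORT A =====
-- A's while loop over the chars: compare to prev sentinel (none = Python's ''), append char+str(i).
-- Strings are modeled via their char lists (exact on the ASCII domain).
def aLoop : List Char → Int → Option Char → List Char → List Char
  | [], _, _, res => res
  | c :: cs, i, prev, res =>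
    if some c ≠ prev then aLoop cs (i + 1) (some c) (res ++ c :: (PySem.Int.toStr i).toList)
    else aLoop cs (i + 1) prev res

def compression2 (astring : String) : Option String :=
  if astring.toList.length < 1 then none
  else some (String.mk (aLoop astring.toList 0 none []))

-- ===== PORT B =====
-- B's outer loop over maximal runs: the inner while scanning equal chars is takeWhile/dropWhile
-- on the tail; each run contributes head-char + str(start index), joined at the end.
def bRuns : List Char → Int → List (List Char)
  | [], _ => []
  | c :: cs, i =>
    (c :: (PySem.Int.toStr i).toList) ::
      bRuns (cs.dropWhile (· = c)) (i + 1 + ((cs.takeWhile (· = c)).length : Int))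
  termination_by l => l.length
  decreasing_by
    simpa using Nat.lt_succ_of_le (List.length_dropWhile_le (· = c) cs)

def compression2_alt (astring : String) : Option String :=
  if astring.toList.length < 1 then none
  else some (String.mk (bRuns astring.toList 0).flatten)

-- ===== PRECONDITION & SPEC =====
def Spec_compression2 (astring : String) (out : Option String) : Prop := out = compression2_alt astring
instance (astring : String) (out : Option String) : Decidable (Spec_compression2 astring out) := by unfold Spec_compression2; infer_instance

-- ===== CLAIM (what is proved, stated in full; the proofs are below) =====
def Claim_equal_compression2 : Prop := ∀ (astring : String), Dom_compression2 astring → Spec_compression2 astring (compression2 astring)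

-- ===== LEMMAS AND PROOFS =====

-- While prev holds char c, A's loop skips the rest of the run, advancing i by its length.
theorem aLoop_skip (c : Char) : ∀ (l : List Char) (i : Int) (res : List Char),
    aLoop l i (some c) res
      = aLoop (l.dropWhile (· = c)) (i + ((l.takeWhile (· = c)).length : Int)) (some c) res := by
  intro l
  induction l with
  | nil => intro i res; simp [aLoop]
  | cons d ds ih =>
    intro i res
    by_cases h : d = c
    · subst h
      rw [show aLoop (d :: ds) i (some d) res = aLoop ds (i + 1) (some d) res from by
            simp [aLoop]]
      rw [ih]
      rw [List.dropWhile_cons_of_pos (by simp), List.takeWhile_cons_of_pos (by simp)]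
      congr 1
      simp only [List.length_cons]
      push_cast
      ring
    · simp [aLoop, List.dropWhile_cons_of_neg, List.takeWhile_cons_of_neg, h]

theorem head_dropWhile_ne (c : Char) : ∀ (l : List Char) (d : Char),
    (l.dropWhile (· = c)).head? = some d → d ≠ c := by
  intro l
  induction l with
  | nil => intro d h; simp [List.dropWhile] at h
  | cons e es ih =>
    intro d h
    by_cases he : e = c
    · exact ih d (by simpa [List.dropWhile, he] using h)
    · rw [List.dropWhile_cons_of_neg (by simpa using he)] at h
      simp at h
      exact h ▸ he

-- Main invariant: when prev differs from the head, A's loop from (i, prev, res)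
-- produces res ++ the flattened run pieces of B starting at index i.
theorem aLoop_eq_bRuns_aux : ∀ (n : Nat) (l : List Char), l.length ≤ n →
    ∀ (prev : Option Char) (i : Int) (res : List Char),
    (∀ d, l.head? = some d → prev ≠ some d) →
    aLoop l i prev res = res ++ (bRuns l i).flatten := by
  intro n
  induction n with
  | zero =>
    intro l hl prev i res _
    have : l = [] := List.eq_nil_of_length_eq_zero (Nat.le_zero.mp hl)
    subst this; simp [aLoop, bRuns]
  | succ m ih =>
    intro l hl prev i res hprev
    cases l with
    | nil => simp [aLoop, bRuns]
    | cons c cs =>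
      have hne : some c ≠ prev := fun h => hprev c rfl h.symm
      rw [show aLoop (c :: cs) i prev res
            = aLoop cs (i + 1) (some c) (res ++ c :: (PySem.Int.toStr i).toList) from by
            simp [aLoop, hne]]
      rw [aLoop_skip]
      rw [ih (cs.dropWhile (· = c))
            (Nat.le_trans (List.length_dropWhile_le _ _) (Nat.lt_succ_iff.mp (by simpa using hl)))
            (some c) _ _ (by
              intro d hd h
              exact head_dropWhile_ne c cs d hd (Option.some.inj h).symm)]
      rw [show bRuns (c :: cs) i
            = (c :: (PySem.Int.toStr i).toList) ::
                bRuns (cs.dropWhile (· = c)) (i + 1 + ((cs.takeWhile (· = c)).length : Int))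
            from by rw [bRuns]]
      simp [add_assoc]

theorem aLoop_eq_bRuns (l : List Char) (prev : Option Char) (i : Int) (res : List Char)
    (h : ∀ d, l.head? = some d → prev ≠ some d) :
    aLoop l i prev res = res ++ (bRuns l i).flatten :=
  aLoop_eq_bRuns_aux l.length l (Nat.le_refl _) prev i res h

-- ===== VERDICT (by name: the statement is the Claim_ definition above) =====
theorem compression2_spec : Claim_equal_compression2 := by
  intro s _
  unfold Spec_compression2 compression2 compression2_alt
  split
  · rfl
  · rw [aLoop_eq_bRuns s.toList none 0 [] (by intro d _ h; cases h)]
    simp
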